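-- pv_equiv track=rewrite | github.com/vanshgarg20/Study-Buddy | app.py | detect_domain
-- ===== SOURCE A (Python) =====
-- from typing import Dict, Any, List, Optional
--
-- def detect_domain(tokens: List[str]) -> str:
--     tset = set(tokens)
--     if any(x in tset for x in ("interview","interviews","resume","cv","cvresume","behavioural","behavioral","behavior","soft","skill","skills","communication","story","portfolio","networking","negotiation","salary","hr","offer","mock")):
--         return "career"
--     if any(x in tset for x in ("dsa","ds","data","structure","structures","algorithm","algorithms","algo")):
--         return "dsa"
--     if any(x in tset for x in ("ml","machine","learning","neural","deep","model","models")):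
--         return "ml"
--     if any(x in tset for x in ("web","frontend","backend","react","vue","javascript","html","css","node")):
--         return "web"
--     if any(x in tset for x in ("db","database","sql","nosql","postgres","mysql","mongodb")):
--         return "db"
--     if any(x in tset for x in ("cv","vision","image","opencv","cnn","segmentation","detection")):
--         return "cv"
--     return "default"
-- ===== SOURCE B (Python) =====
-- _DOMAINS = [
--     ("career", ("interview","interviews","resume","cv","cvresume","behavioural","behavioral","behavior","soft","skill","skills","communication","story","portfolio","networking","negotiation","salary","hr","offer","mock")),
--     ("dsa", ("dsa","ds","data","structure","structures","algorithm","algorithms","algo")),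
--     ("ml", ("ml","machine","learning","neural","deep","model","models")),
--     ("web", ("web","frontend","backend","react","vue","javascript","html","css","node")),
--     ("db", ("db","database","sql","nosql","postgres","mysql","mongodb")),
--     ("cv", ("cv","vision","image","opencv","cnn","segmentation","detection")),
-- ]
--
-- # keyword -> priority rank; a keyword shared by several domains keeps the lowest rank
-- _RANK = {}
-- for _r, (_name, _kws) in enumerate(_DOMAINS):
--     for _k in _kws:
--         _RANK.setdefault(_k, _r)
--
--
-- def detect_domain(tokens):
--     best = None
--     for t in tokens:
--         r = _RANK.get(t)
--         if r is not None and (best is None or r < best):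
--             best = r
--     return "default" if best is None else _DOMAINS[best][0]
-- ===== Notes on version B (the rewrite author's own statement) =====
-- stated objective: alternative
-- what changed: Replaces the six sequential any(keyword in set(tokens)) scans by a precomputed keyword->priority-rank index (built once with setdefault so 'cv' keeps the career rank) and a single pass over tokens keeping the minimum rank, mapped back to the domain name.
import Mathlib
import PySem

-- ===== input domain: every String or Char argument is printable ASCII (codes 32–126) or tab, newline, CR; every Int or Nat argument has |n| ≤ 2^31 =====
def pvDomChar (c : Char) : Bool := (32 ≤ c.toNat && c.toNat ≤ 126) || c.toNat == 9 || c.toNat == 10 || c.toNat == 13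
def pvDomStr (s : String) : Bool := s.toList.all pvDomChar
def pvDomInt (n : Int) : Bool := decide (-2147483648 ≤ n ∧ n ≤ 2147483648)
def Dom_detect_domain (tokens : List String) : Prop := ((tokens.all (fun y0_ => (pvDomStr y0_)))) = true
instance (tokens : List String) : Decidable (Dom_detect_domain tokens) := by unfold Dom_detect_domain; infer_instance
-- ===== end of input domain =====

-- B replaces A's six sequential keyword-set scans by a precomputed keyword→priority-rank
-- index and a single minimum-rank pass over the tokens (objective: alternative decomposition).

-- ===== PORT A =====
def detect_domain (tokens : List String) : String :=
  let tset : PySem.Set String := PySem.Set.ofList tokens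
  if (["interview","interviews","resume","cv","cvresume","behavioural","behavioral","behavior","soft","skill","skills","communication","story","portfolio","networking","negotiation","salary","hr","offer","mock"].any (fun x => PySem.Set.contains tset x)) then "career"
  else if (["dsa","ds","data","structure","structures","algorithm","algorithms","algo"].any (fun x => PySem.Set.contains tset x)) then "dsa"
  else if (["ml","machine","learning","neural","deep","model","models"].any (fun x => PySem.Set.contains tset x)) then "ml"
  else if (["web","frontend","backend","react","vue","javascript","html","css","node"].any (fun x => PySem.Set.contains tset x)) then "web"
  else if (["db","database","sql","nosql","postgres","mysql","mongodb"].any (fun x => PySem.Set.contains tset x)) then "db"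
  else if (["cv","vision","image","opencv","cnn","segmentation","detection"].any (fun x => PySem.Set.contains tset x)) then "cv"
  else "default"

-- ===== PORT B =====
-- module-level constant _DOMAINS of Source B
def kwDomains : List (String × List String) :=
  [("career", ["interview","interviews","resume","cv","cvresume","behavioural","behavioral","behavior","soft","skill","skills","communication","story","portfolio","networking","negotiation","salary","hr","offer","mock"]),
   ("dsa", ["dsa","ds","data","structure","structures","algorithm","algorithms","algo"]),
   ("ml", ["ml","machine","learning","neural","deep","model","models"]),
   ("web", ["web","frontend","backend","react","vue","javascript","html","css","node"]),
   ("db", ["db","database","sql","nosql","postgres","mysql","mongodb"]),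
   ("cv", ["cv","vision","image","opencv","cnn","segmentation","detection"])]

-- module-level constant _RANK of Source B (the enumerate/setdefault double loop)
def pvRank : PySem.Dict String Int :=
  (PySem.List.enumerate kwDomains).foldl
    (fun d p => p.2.2.foldl (fun d k => d.setdefault k p.1) d)
    PySem.Dict.empty

def detect_domain_alt (tokens : List String) : String :=
  let best : Option Int := tokens.foldl
    (fun best t =>
      match pvRank.get? t with
      | none => best
      | some r =>
        match best with
        | none => some r
        | some b => if r < b then some r else best)
    none
  match best with
  | none => "default"
  | some b =>
    match PySem.List.pyGet? kwDomains b with   -- _DOMAINS[best]; in range whenever best ≠ None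
    | some nd => nd.1
    | none => "default"

-- ===== PRECONDITION & SPEC =====
def Spec_detect_domain (tokens : List String) (out : String) : Prop := out = detect_domain_alt tokens
instance (tokens : List String) (out : String) : Decidable (Spec_detect_domain tokens out) := by unfold Spec_detect_domain; infer_instance

-- ===== CLAIM (what is proved, stated in full; the proofs are below) =====
def Claim_equal_detect_domain : Prop := ∀ (tokens : List String), Dom_detect_domain tokens → Spec_detect_domain tokens (detect_domain tokens)

-- ===== LEMMAS AND PROOFS =====

-- min of two optional ranks (none = no match yet)
def pvOptMin : Option Int → Option Int → Option Int
  | none, b => b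
  | some r, none => some r
  | some r, some b => if r < b then some r else some b

def pvStep (best : Option Int) (t : String) : Option Int :=
  match pvRank.get? t with
  | none => best
  | some r =>
    match best with
    | none => some r
    | some b => if r < b then some r else best

def pvToRank (c0 c1 c2 c3 c4 c5 : Bool) : Option Int :=
  if c0 then some 0 else if c1 then some 1 else if c2 then some 2
  else if c3 then some 3 else if c4 then some 4 else if c5 then some 5 else none

def pvL0 : List String := ["interview","interviews","resume","cv","cvresume","behavioural","behavioral","behavior","soft","skill","skills","communication","story","portfolio","networking","negotiation","salary","hr","offer","mock"]
def pvL1 : List String := ["dsa","ds","data","structure","structures","algorithm","algorithms","algo"]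
def pvL2 : List String := ["ml","machine","learning","neural","deep","model","models"]
def pvL3 : List String := ["web","frontend","backend","react","vue","javascript","html","css","node"]
def pvL4 : List String := ["db","database","sql","nosql","postgres","mysql","mongodb"]
def pvL5 : List String := ["cv","vision","image","opencv","cnn","segmentation","detection"]

def pvHit (L : List String) (tokens : List String) : Bool :=
  L.any (fun x => tokens.contains x)

lemma pvStep_eq (best : Option Int) (t : String) :
    pvStep best t = pvOptMin (pvRank.get? t) best := by
  unfold pvStep pvOptMin
  cases pvRank.get? t with
  | none => rfl
  | some r => cases best with
    | none => rfl
    | some b => rfl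

lemma pvOptMin_none_right (a : Option Int) : pvOptMin a none = a := by
  cases a <;> rfl

lemma pvOptMin_none_left (b : Option Int) : pvOptMin none b = b := rfl

lemma pvOptMin_some_none (r : Int) : pvOptMin (some r) none = some r := rfl

lemma pvOptMin_some_some (r b : Int) : pvOptMin (some r) (some b) = some (min r b) := by
  show (if r < b then some r else some b) = some (min r b)
  split_ifs with h <;> simp only [Option.some.injEq] <;> omega

lemma pvOptMin_comm (a b : Option Int) : pvOptMin a b = pvOptMin b a := by
  cases a <;> cases b <;>
    simp [pvOptMin_none_left, pvOptMin_some_none, pvOptMin_some_some, min_comm]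

lemma pvOptMin_assoc (a b c : Option Int) :
    pvOptMin (pvOptMin a b) c = pvOptMin a (pvOptMin b c) := by
  cases a <;> cases b <;> cases c <;>
    simp [pvOptMin_none_left, pvOptMin_some_none, pvOptMin_some_some, min_assoc]

lemma pvFoldl_acc (ts : List String) (acc : Option Int) :
    ts.foldl pvStep acc = pvOptMin acc (ts.foldl pvStep none) := by
  induction ts generalizing acc with
  | nil => exact (pvOptMin_none_right acc).symm
  | cons t ts ih =>
    simp only [List.foldl_cons]
    rw [ih (pvStep acc t), ih (pvStep none t), pvStep_eq, pvStep_eq,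
      pvOptMin_none_right, pvOptMin_comm (pvRank.get? t) acc, pvOptMin_assoc]

def pvKeys : List String := ["interview", "interviews", "resume", "cv", "cvresume", "behavioural", "behavioral", "behavior", "soft", "skill", "skills", "communication", "story", "portfolio", "networking", "negotiation", "salary", "hr", "offer", "mock", "dsa", "ds", "data", "structure", "structures", "algorithm", "algorithms", "algo", "ml", "machine", "learning", "neural", "deep", "model", "models", "web", "frontend", "backend", "react", "vue", "javascript", "html", "css", "node", "db", "database", "sql", "nosql", "postgres", "mysql", "mongodb", "vision", "image", "opencv", "cnn", "segmentation", "detection"]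

set_option maxRecDepth 100000 in
set_option maxHeartbeats 2000000 in
lemma pvRank_lit : pvRank = PySem.Dict.mk
  [("interview", 0), ("interviews", 0), ("resume", 0), ("cv", 0), ("cvresume", 0),
     ("behavioural", 0), ("behavioral", 0), ("behavior", 0), ("soft", 0), ("skill", 0),
     ("skills", 0), ("communication", 0), ("story", 0), ("portfolio", 0), ("networking", 0),
     ("negotiation", 0), ("salary", 0), ("hr", 0), ("offer", 0), ("mock", 0),
     ("dsa", 1), ("ds", 1), ("data", 1), ("structure", 1), ("structures", 1),
     ("algorithm", 1), ("algorithms", 1), ("algo", 1),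
     ("ml", 2), ("machine", 2), ("learning", 2), ("neural", 2), ("deep", 2),
     ("model", 2), ("models", 2),
     ("web", 3), ("frontend", 3), ("backend", 3), ("react", 3), ("vue", 3),
     ("javascript", 3), ("html", 3), ("css", 3), ("node", 3),
     ("db", 4), ("database", 4), ("sql", 4), ("nosql", 4), ("postgres", 4),
     ("mysql", 4), ("mongodb", 4),
     ("vision", 5), ("image", 5), ("opencv", 5), ("cnn", 5), ("segmentation", 5),
     ("detection", 5)] := by decide

set_option maxRecDepth 100000 in
set_option maxHeartbeats 2000000 in
lemma pvRank_spec (t : String) :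
    pvRank.get? t =
      pvToRank (pvL0.contains t) (pvL1.contains t) (pvL2.contains t)
               (pvL3.contains t) (pvL4.contains t) (pvL5.contains t) := by
  by_cases h : t ∈ pvKeys
  · rw [pvRank_lit]
    fin_cases h <;> decide
  · have h0 : t ∉ pvL0 := by intro hm; exact h (by fin_cases hm <;> decide)
    have h1 : t ∉ pvL1 := by intro hm; exact h (by fin_cases hm <;> decide)
    have h2 : t ∉ pvL2 := by intro hm; exact h (by fin_cases hm <;> decide)
    have h3 : t ∉ pvL3 := by intro hm; exact h (by fin_cases hm <;> decide)
    have h4 : t ∉ pvL4 := by intro hm; exact h (by fin_cases hm <;> decide)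
    have h5 : t ∉ pvL5 := by intro hm; exact h (by fin_cases hm <;> decide)
    have hk : pvRank.get? t = none := by
      rw [pvRank_lit, PySem.Dict.get?_eq_none_iff_not_mem_keys]
      intro hm
      simp only [PySem.Dict.keys_mk] at hm
      fin_cases hm <;> simp_all [pvL0, pvL1, pvL2, pvL3, pvL4, pvL5]
    rw [hk]
    simp [pvToRank, h0, h1, h2, h3, h4, h5]

lemma pvComb (c0 c1 c2 c3 c4 c5 b0 b1 b2 b3 b4 b5 : Bool) :
    pvOptMin (pvToRank c0 c1 c2 c3 c4 c5) (pvToRank b0 b1 b2 b3 b4 b5)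
      = pvToRank (c0 || b0) (c1 || b1) (c2 || b2) (c3 || b3) (c4 || b4) (c5 || b5) := by
  cases c0 <;> cases c1 <;> cases c2 <;> cases c3 <;> cases c4 <;> cases c5 <;>
    cases b0 <;> cases b1 <;> cases b2 <;> cases b3 <;> cases b4 <;> cases b5 <;> rfl

lemma pvHit_cons (L : List String) (t : String) (ts : List String) :
    pvHit L (t :: ts) = (L.contains t || pvHit L ts) := by
  simp only [pvHit]
  rw [Bool.eq_iff_iff]
  simp only [List.any_eq_true, Bool.or_eq_true, List.contains_iff_mem, List.mem_cons]
  constructor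
  · rintro ⟨x, hx, h | h⟩
    · exact Or.inl (h ▸ hx)
    · exact Or.inr ⟨x, hx, h⟩
  · rintro (h | ⟨x, hx, h⟩)
    · exact ⟨t, h, Or.inl rfl⟩
    · exact ⟨x, hx, Or.inr h⟩

lemma pvBestChar (tokens : List String) :
    tokens.foldl pvStep none =
      pvToRank (pvHit pvL0 tokens) (pvHit pvL1 tokens) (pvHit pvL2 tokens)
               (pvHit pvL3 tokens) (pvHit pvL4 tokens) (pvHit pvL5 tokens) := by
  induction tokens with
  | nil => simp [pvHit, pvToRank]
  | cons t ts ih =>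
    simp only [List.foldl_cons]
    rw [pvFoldl_acc, ih, pvStep_eq, pvOptMin_none_right, pvRank_spec, pvComb]
    simp only [pvHit_cons]

lemma pvFinal (b0 b1 b2 b3 b4 b5 : Bool) :
    (match pvToRank b0 b1 b2 b3 b4 b5 with
     | none => "default"
     | some b =>
       match PySem.List.pyGet? kwDomains b with
       | some nd => nd.1
       | none => "default")
      = (if b0 then "career" else if b1 then "dsa" else if b2 then "ml"
         else if b3 then "web" else if b4 then "db" else if b5 then "cv" else "default") := by
  cases b0 <;> cases b1 <;> cases b2 <;> cases b3 <;> cases b4 <;> cases b5 <;> rfl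

lemma pvSetContains (tokens : List String) (x : String) :
    PySem.Set.contains (PySem.Set.ofList tokens) x = tokens.contains x := by
  rw [Bool.eq_iff_iff]
  simp only [PySem.Set.contains_iff, PySem.Set.mem_ofList, List.contains_iff_mem]

-- ===== VERDICT (by name: the statement is the Claim_ definition above) =====
set_option maxRecDepth 100000 in
set_option maxHeartbeats 2000000 in
theorem detect_domain_spec : Claim_equal_detect_domain := by
  intro tokens _
  unfold Spec_detect_domain
  show detect_domain tokens = detect_domain_alt tokens
  unfold detect_domain detect_domain_alt
  simp only [pvSetContains]
  rw [show (tokens.foldl (fun best t =>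
      match pvRank.get? t with
      | none => best
      | some r =>
        match best with
        | none => some r
        | some b => if r < b then some r else best) none) = tokens.foldl pvStep none from rfl]
  rw [pvBestChar, pvFinal]
  rfl
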